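-- pv_equiv track=rewrite | github.com/alexwauquier/industrial-display-modbus-tcp | app/main.py | string_to_registers_utf8
-- ===== SOURCE A (Python) =====
-- def string_to_registers_utf8(s):
--     b = s.encode('utf-8')
--     registers = []
--     for i in range(0, len(b), 2):
--         high = b[i]
--         low = b[i+1] if i+1 < len(b) else 0
--         reg = (high << 8) + low
--         registers.append(reg)
--     return registers
-- ===== SOURCE B (Python) =====
-- def string_to_registers_utf8(s):
--     b = s.encode('utf-8')
--     if len(b) % 2:
--         b += b'\x00'
--     n = int.from_bytes(b, 'big')
--     regs = []
--     for _ in range(len(b) // 2):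
--         regs.append(n & 0xFFFF)
--         n >>= 16
--     return regs[::-1]
-- ===== Notes on version B (the rewrite author's own statement) =====
-- stated objective: alternative
-- what changed: B pads the byte buffer to even length, decodes it in bulk as one big-endian integer with int.from_bytes, and then peels 16-bit words off the low end back-to-front, instead of A's per-index loop with conditional low-byte handling and manual (high<<8)+low arithmetic.
import Mathlib
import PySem

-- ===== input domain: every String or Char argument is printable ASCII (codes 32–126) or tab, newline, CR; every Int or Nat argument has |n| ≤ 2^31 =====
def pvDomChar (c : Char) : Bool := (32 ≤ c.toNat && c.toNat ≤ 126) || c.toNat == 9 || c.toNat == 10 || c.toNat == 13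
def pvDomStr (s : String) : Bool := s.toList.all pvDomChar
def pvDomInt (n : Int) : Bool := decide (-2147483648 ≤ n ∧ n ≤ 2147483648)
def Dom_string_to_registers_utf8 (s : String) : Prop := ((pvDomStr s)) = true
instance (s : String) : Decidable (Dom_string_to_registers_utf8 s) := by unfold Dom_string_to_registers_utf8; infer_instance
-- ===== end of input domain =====

-- B decodes the padded byte buffer in bulk as one big-endian integer and peels 16-bit
-- words off the low end, instead of A's per-index loop with manual (high<<8)+low maths;
-- objective: alternative (same cost). s.encode('utf-8') is ported as the list of char
-- codes, which is exact on the ASCII domain Dom_.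

-- ===== PORT A =====
def string_to_registers_utf8 (s : String) : List Int :=
  let b : List Int := s.toList.map (fun c => (c.toNat : Int))   -- s.encode('utf-8'): exact on ASCII (Dom_)
  (PySem.List.pyRange 0 b.length 2).foldl (fun registers i =>
    let high := PySem.List.pyGetD b i 0                          -- b[i]; i always in range here
    let low := if i + 1 < (b.length : Int) then PySem.List.pyGetD b (i + 1) 0 else 0
    let reg := high * 256 + low                                  -- (high << 8) + low; high ≥ 0, exact
    registers ++ [reg]) []

-- ===== PORT B =====
-- the extraction loop: 'for _ in range(k): regs.append(n & 0xFFFF); n >>= 16'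
-- (n ≥ 0 throughout, so & 0xFFFF = % 65536 and >> 16 = / 65536, exact)
def pvExtract : Nat → Int → List Int → List Int
  | 0, _, regs => regs
  | k + 1, n, regs => pvExtract k (n / 65536) (regs ++ [n % 65536])

def string_to_registers_utf8_alt (s : String) : List Int :=
  let b0 : List Int := s.toList.map (fun c => (c.toNat : Int))   -- s.encode('utf-8'): exact on ASCII (Dom_)
  let b := if b0.length % 2 = 1 then b0 ++ [0] else b0           -- pad with b'\x00' when odd
  let n := b.foldl (fun acc x => acc * 256 + x) 0                -- int.from_bytes(b, 'big')
  (pvExtract (b.length / 2) n []).reverse                        -- regs[::-1]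

-- ===== PRECONDITION & SPEC =====
def Spec_string_to_registers_utf8 (s : String) (out : List Int) : Prop := out = string_to_registers_utf8_alt s
instance (s : String) (out : List Int) : Decidable (Spec_string_to_registers_utf8 s out) := by unfold Spec_string_to_registers_utf8; infer_instance

-- ===== CLAIM (what is proved, stated in full; the proofs are below) =====
def Claim_equal_string_to_registers_utf8 : Prop := ∀ (s : String), Dom_string_to_registers_utf8 s → Spec_string_to_registers_utf8 s (string_to_registers_utf8 s)

-- ===== LEMMAS AND PROOFS =====

-- the common specification: big-endian 16-bit words of a byte list, odd tail padded with 0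
def pvPairs : List Int → List Int
  | [] => []
  | [a] => [a * 256]
  | a :: b :: t => (a * 256 + b) :: pvPairs t

lemma pyRange_two_cons (a b : Int) (h : a < b) :
    PySem.List.pyRange a b 2 = a :: PySem.List.pyRange (a + 2) b 2 := by
  rw [PySem.List.pyRange_of_pos a b (by norm_num), PySem.List.pyRange_of_pos (a + 2) b (by norm_num)]
  have h1 : ((b - a + 2 - 1) / 2).toNat = ((b - (a + 2) + 2 - 1) / 2).toNat + 1 := by omega
  rw [if_pos h, h1, List.range_succ_eq_map]
  by_cases h2 : a + 2 < b
  · rw [if_pos h2]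
    simp [List.map_map, Function.comp_def]
    intro k _
    ring
  · rw [if_neg h2]
    have : ((b - (a + 2) + 2 - 1) / 2).toNat = 0 := by omega
    simp [this]

lemma foldA (b : List Int) : ∀ (fuel k : Nat) (regs : List Int), b.length ≤ k + fuel →
    (PySem.List.pyRange (k : Int) b.length 2).foldl (fun registers i =>
      registers ++ [PySem.List.pyGetD b i 0 * 256 +
        (if i + 1 < (b.length : Int) then PySem.List.pyGetD b (i + 1) 0 else 0)]) regs
    = regs ++ pvPairs (b.drop k) := by
  intro fuel
  induction fuel with
  | zero =>
    intro k regs h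
    have hk : (b.length : Int) ≤ (k : Int) := by exact_mod_cast (by omega : b.length ≤ k)
    rw [PySem.List.pyRange_of_pos _ _ (by norm_num), if_neg (not_lt.2 hk)]
    rw [List.drop_eq_nil_of_le (by omega)]
    simp [pvPairs]
  | succ m ih =>
    intro k regs h
    by_cases hk : k < b.length
    · rw [pyRange_two_cons _ _ (by exact_mod_cast hk)]
      rw [List.foldl_cons]
      have hcast2 : (k : Int) + 2 = ((k + 2 : Nat) : Int) := by push_cast; ring
      have hcast1 : (k : Int) + 1 = ((k + 1 : Nat) : Int) := by push_cast; ring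
      rw [hcast2, ih (k + 2) _ (by omega)]
      have hdropk : b.drop k = b[k] :: b.drop (k + 1) := List.drop_eq_getElem_cons hk
      have hget : PySem.List.pyGetD b (k : Int) 0 = b[k] := by
        rw [PySem.List.pyGetD_natCast]; exact List.getD_eq_getElem b 0 hk
      by_cases hk1 : k + 1 < b.length
      · have hdropk1 : b.drop (k + 1) = b[k + 1] :: b.drop (k + 2) := List.drop_eq_getElem_cons hk1
        have hget1 : PySem.List.pyGetD b ((k + 1 : Nat) : Int) 0 = b[k + 1] := by
          rw [PySem.List.pyGetD_natCast]; exact List.getD_eq_getElem b 0 hk1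
        rw [hdropk, hdropk1]
        rw [if_pos (by rw [hcast1]; exact_mod_cast hk1), hcast1, hget1, hget]
        simp [pvPairs]
      · have hk1e : k + 1 = b.length := by omega
        have hdrop1 : b.drop (k + 1) = [] := List.drop_eq_nil_of_le (by omega)
        have hdrop2 : b.drop (k + 2) = [] := List.drop_eq_nil_of_le (by omega)
        rw [hdropk, hdrop1, hdrop2]
        rw [if_neg (by rw [hcast1]; exact_mod_cast (by omega : ¬ (k + 1 < b.length))), hget]
        simp [pvPairs]
    · have hk' : (b.length : Int) ≤ (k : Int) := by exact_mod_cast Nat.le_of_not_lt hk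
      rw [PySem.List.pyRange_of_pos _ _ (by norm_num), if_neg (not_lt.2 hk')]
      rw [List.drop_eq_nil_of_le (Nat.le_of_not_lt hk)]
      simp [pvPairs]

-- A's fold equals pvPairs of the byte list
lemma A_eq_pvPairs (b : List Int) :
    (PySem.List.pyRange 0 b.length 2).foldl (fun registers i =>
      registers ++ [PySem.List.pyGetD b i 0 * 256 +
        (if i + 1 < (b.length : Int) then PySem.List.pyGetD b (i + 1) 0 else 0)]) []
    = pvPairs b := by
  have := foldA b b.length 0 [] (by omega)
  simpa using this

def pvVal (l : List Int) : Int := l.foldl (fun acc x => acc * 256 + x) 0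

lemma pvVal_append_pair (l : List Int) (a b : Int) :
    pvVal (l ++ [a, b]) = pvVal l * 65536 + (a * 256 + b) := by
  unfold pvVal
  rw [List.foldl_append]
  simp; ring

lemma pvVal_nonneg_aux (l : List Int) : ∀ init : Int, 0 ≤ init → (∀ x ∈ l, 0 ≤ x) →
    0 ≤ l.foldl (fun acc x => acc * 256 + x) init := by
  induction l with
  | nil => intro init h _; simpa using h
  | cons y t ih =>
    intro init h hl
    rw [List.foldl_cons]
    exact ih _ (by have := hl y (by simp); positivity) (fun x hx => hl x (by simp [hx]))

lemma pvVal_nonneg (l : List Int) (h : ∀ x ∈ l, 0 ≤ x) : 0 ≤ pvVal l :=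
  pvVal_nonneg_aux l 0 le_rfl h

lemma pvPairs_append_pair (l : List Int) (a b : Int) (h : l.length % 2 = 0) :
    pvPairs (l ++ [a, b]) = pvPairs l ++ [a * 256 + b] := by
  induction l using pvPairs.induct with
  | case1 => simp [pvPairs]
  | case2 x => simp at h
  | case3 x y t ih => simp [pvPairs]; exact ih (by simp only [List.length_cons] at h; omega)

lemma pvPairs_append_zero (l : List Int) (h : l.length % 2 = 1) :
    pvPairs (l ++ [0]) = pvPairs l := by
  induction l using pvPairs.induct with
  | case1 => simp at h
  | case2 x => simp [pvPairs]
  | case3 x y t ih => simp [pvPairs]; exact ih (by simp only [List.length_cons] at h; omega)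

lemma extract_spec : ∀ (m : Nat) (l regs : List Int), l.length = 2 * m →
    (∀ x ∈ l, 0 ≤ x ∧ x < 256) →
    pvExtract m (pvVal l) regs = regs ++ (pvPairs l).reverse := by
  intro m
  induction m with
  | zero =>
    intro l regs hl _
    have : l = [] := List.eq_nil_of_length_eq_zero (by omega)
    subst this
    simp [pvExtract, pvPairs]
  | succ k ih =>
    intro l regs hl hb
    -- split off the last two bytes: l = l' ++ [a, b]
    obtain ⟨b, r1, hr1⟩ : ∃ b r1, l.reverse = b :: r1 := by
      cases hrev : l.reverse with
      | nil =>
        exfalso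
        have h1 := congrArg List.length hrev
        simp only [List.length_reverse, List.length_nil] at h1
        omega
      | cons b r1 => exact ⟨b, r1, rfl⟩
    obtain ⟨a, r2, hr2⟩ : ∃ a r2, r1 = a :: r2 := by
      cases hr : r1 with
      | nil =>
        exfalso
        have h1 := congrArg List.length hr1
        simp only [hr, List.length_reverse, List.length_cons, List.length_nil] at h1
        omega
      | cons a r2 => exact ⟨a, r2, rfl⟩
    have hl' : l = r2.reverse ++ [a, b] := by
      have : l.reverse.reverse = (b :: a :: r2).reverse := by rw [hr1, hr2]
      simpa using this
    set l' := r2.reverse with hl'def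
    have hlen' : l'.length = 2 * k := by
      have h2 : l.length = l'.length + 2 := by rw [hl']; simp
      omega
    have hbl' : ∀ x ∈ l', 0 ≤ x ∧ x < 256 := fun x hx => hb x (by rw [hl']; simp [hx])
    have hba : 0 ≤ a ∧ a < 256 := hb a (by rw [hl']; simp)
    have hbb : 0 ≤ b ∧ b < 256 := hb b (by rw [hl']; simp)
    have hvnn : 0 ≤ pvVal l' := pvVal_nonneg l' (fun x hx => (hbl' x hx).1)
    rw [hl', pvVal_append_pair]
    show pvExtract (k + 1) _ _ = _
    rw [pvExtract]
    have hp1 : 0 ≤ a * 256 + b := by nlinarith [hba.1, hbb.1]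
    have hp2 : a * 256 + b < 65536 := by nlinarith [hba.2, hbb.2, hbb.1]
    have hdiv : (pvVal l' * 65536 + (a * 256 + b)) / 65536 = pvVal l' := by
      rw [add_comm, Int.add_mul_ediv_right _ _ (by norm_num : (65536 : Int) ≠ 0),
        Int.ediv_eq_zero_of_lt hp1 hp2, zero_add]
    have hmod : (pvVal l' * 65536 + (a * 256 + b)) % 65536 = a * 256 + b := by
      rw [add_comm, Int.add_mul_emod_self_right]
      exact Int.emod_eq_of_lt hp1 hp2
    rw [hdiv, hmod, ih l' _ hlen' hbl', pvPairs_append_pair l' a b (by omega)]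
    simp

-- B equals pvPairs of the padded byte list; C-side bound comes from Dom_
lemma dom_bytes_bound (s : String) (hd : Dom_string_to_registers_utf8 s) :
    ∀ x ∈ s.toList.map (fun c => (c.toNat : Int)), 0 ≤ x ∧ x < 256 := by
  intro x hx
  simp only [List.mem_map] at hx
  obtain ⟨c, hc, rfl⟩ := hx
  unfold Dom_string_to_registers_utf8 pvDomStr at hd
  rw [List.all_eq_true] at hd
  have := hd c hc
  unfold pvDomChar at this
  simp only [Bool.or_eq_true, Bool.and_eq_true, decide_eq_true_eq, beq_iff_eq] at this
  omega

-- ===== VERDICT (by name: the statement is the Claim_ definition above) =====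
theorem string_to_registers_utf8_spec : Claim_equal_string_to_registers_utf8 := by
  intro s hd
  unfold Spec_string_to_registers_utf8 string_to_registers_utf8 string_to_registers_utf8_alt
  dsimp only
  have hb := dom_bytes_bound s hd
  set b0 : List Int := s.toList.map (fun c => (c.toNat : Int)) with hb0
  rw [A_eq_pvPairs]
  by_cases hodd : b0.length % 2 = 1
  · rw [if_pos hodd]
    have hlen : (b0 ++ [0]).length = 2 * ((b0 ++ [0]).length / 2) := by simp; omega
    rw [show List.foldl (fun acc x => acc * 256 + x) 0 (b0 ++ [0]) = pvVal (b0 ++ [0]) from rfl]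
    rw [extract_spec _ _ _ hlen (by
      intro x hx
      rcases List.mem_append.1 hx with h | h
      · exact hb x h
      · simp at h; omega)]
    simp [pvPairs_append_zero b0 hodd]
  · rw [if_neg hodd]
    have hlen : b0.length = 2 * (b0.length / 2) := by omega
    rw [show List.foldl (fun acc x => acc * 256 + x) 0 b0 = pvVal b0 from rfl]
    rw [extract_spec _ _ _ hlen hb]
    simp
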